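-- pv_equiv track=rewrite | github.com/IsacAnd/startwars-api | app/services/people_service.py | filter_people
-- ===== SOURCE A (Python) =====
-- def filter_people(results: list[dict], name: str | None, gender: str | None):
--     if name:
--         results = [
--             p for p in results
--             if name.lower() in p["name"].lower()
--         ]
--
--     if gender:
--         results = [
--             p for p in results
--             if gender.lower() == p["gender"].lower()
--         ]
--
--     return results
-- ===== SOURCE B (Python) =====
-- def filter_people(results: list[dict], name: str | None, gender: str | None):
--     # Build a one-pass index of people grouped by lowercased gender, then select
--     # the requested bucket directly instead of scanning with an equality test;
--     # the name substring filter runs only over that (usually much smaller) bucket.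
--     if gender:
--         by_gender = {}
--         for p in results:
--             by_gender.setdefault(p.get("gender", "").lower(), []).append(p)
--         results = by_gender.get(gender.lower(), [])
--     if name:
--         needle = name.lower()
--         results = [p for p in results if needle in p["name"].lower()]
--     return results
-- ===== Notes on version B (the rewrite author's own statement) =====
-- stated objective: alternative
-- what changed: Replaces A's equality-scan gender filter with a dict index built in one pass (group people by lowercased gender, then select the requested bucket directly), and runs the name substring filter only over that bucket; stages are applied in the opposite order.
import Mathlib
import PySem

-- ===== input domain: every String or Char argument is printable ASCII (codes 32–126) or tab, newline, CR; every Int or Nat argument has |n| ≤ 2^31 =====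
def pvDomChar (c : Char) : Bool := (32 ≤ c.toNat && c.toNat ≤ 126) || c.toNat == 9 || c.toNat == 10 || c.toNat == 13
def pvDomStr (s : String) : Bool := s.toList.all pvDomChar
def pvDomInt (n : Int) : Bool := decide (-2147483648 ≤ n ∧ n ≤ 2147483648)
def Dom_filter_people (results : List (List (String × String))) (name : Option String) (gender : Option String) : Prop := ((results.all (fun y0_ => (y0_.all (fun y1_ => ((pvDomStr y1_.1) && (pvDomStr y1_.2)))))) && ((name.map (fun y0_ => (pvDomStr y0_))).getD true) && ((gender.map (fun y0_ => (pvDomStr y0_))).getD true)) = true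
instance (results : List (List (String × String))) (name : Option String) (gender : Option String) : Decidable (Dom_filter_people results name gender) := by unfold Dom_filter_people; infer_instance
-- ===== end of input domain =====

-- B replaces A's equality-scan gender filter by a dict index grouping people by
-- lowercased gender (one pass), selects the requested bucket, and runs the name
-- filter only over that bucket; same return value on Pre_ (objective: alternative).

-- ===== PORT A =====
-- truthiness of an optional string argument ('if name:' in Python)
def pvTruthy (o : Option String) : Bool :=
  match o with
  | none => false
  | some s => !(s == "")

-- p["k"] on the association list; Pre_ guarantees the key is present wherever A reads it
def pvGetKey (p : List (String × String)) (k : String) : String :=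
  ((PySem.Dict.mk p).get? k).getD ""

def filter_people (results : List (List (String × String))) (name : Option String) (gender : Option String) : List (List (String × String)) :=
  let results1 :=
    if pvTruthy name then
      results.filter (fun p =>
        PySem.Str.isIn (PySem.Str.lower (name.getD "")) (PySem.Str.lower (pvGetKey p "name")))
    else results
  let results2 :=
    if pvTruthy gender then
      results1.filter (fun p =>
        PySem.Str.lower (gender.getD "") == PySem.Str.lower (pvGetKey p "gender"))
    else results1
  results2

-- ===== PORT B =====
-- p.get("gender", "").lower(), the grouping key of Source B's index-building loop
def pvGenderKey (p : List (String × String)) : String :=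
  PySem.Str.lower (((PySem.Dict.mk p).get? "gender").getD "")

-- the loop 'for p in results: by_gender.setdefault(...).append(p)' (setdefault+append = modify with default [])
def pvByGender (results : List (List (String × String))) : PySem.Dict String (List (List (String × String))) :=
  results.foldl (fun d p => d.modify (pvGenderKey p) [] (fun b => b ++ [p])) PySem.Dict.empty

def filter_people_alt (results : List (List (String × String))) (name : Option String) (gender : Option String) : List (List (String × String)) :=
  let results1 :=
    if pvTruthy gender then
      (pvByGender results).getD (PySem.Str.lower (gender.getD "")) []
    else results
  if pvTruthy name then
    let needle := PySem.Str.lower (name.getD "")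
    results1.filter (fun p => PySem.Str.isIn needle (PySem.Str.lower (pvGetKey p "name")))
  else results1

-- ===== PRECONDITION & SPEC =====
-- Pre_ excludes exactly the inputs where Python A raises KeyError: a person missing
-- "name" while the name argument is truthy, or missing "gender" while the gender
-- argument is truthy and the person survives the name filter (only there is p["gender"] read).
def Pre_filter_people (results : List (List (String × String))) (name : Option String) (gender : Option String) : Prop :=
  results.all (fun p =>
    ((!pvTruthy name) || ((PySem.Dict.mk p).get? "name").isSome) &&
    ((!pvTruthy gender) ||
      (!((!pvTruthy name) ||
         PySem.Str.isIn (PySem.Str.lower (name.getD "")) (PySem.Str.lower (pvGetKey p "name")))) ||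
      ((PySem.Dict.mk p).get? "gender").isSome)) = true
instance (results : List (List (String × String))) (name : Option String) (gender : Option String) : Decidable (Pre_filter_people results name gender) := by unfold Pre_filter_people; infer_instance

def pvWitness_filter_people : (List (List (String × String))) × Option String × Option String :=
  ([[("name", "Luke Skywalker"), ("gender", "male")], [("name", "Leia"), ("gender", "female")]], some "l", some "MALE")

def Spec_filter_people (results : List (List (String × String))) (name : Option String) (gender : Option String) (out : List (List (String × String))) : Prop := out = filter_people_alt results name gender
instance (results : List (List (String × String))) (name : Option String) (gender : Option String) (out : List (List (String × String))) : Decidable (Spec_filter_people results name gender out) := by unfold Spec_filter_people; infer_instance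

-- ===== CLAIM (what is proved, stated in full; the proofs are below) =====
def Claim_equal_filter_people : Prop := ∀ (results : List (List (String × String))) (name : Option String) (gender : Option String), Dom_filter_people results name gender → Pre_filter_people results name gender → Spec_filter_people results name gender (filter_people results name gender)

-- ===== LEMMAS AND PROOFS =====
-- the bucket of the group-by index is exactly the stable equality filter
theorem getD_foldl_group (l : List (List (String × String)))
    (d : PySem.Dict String (List (List (String × String)))) (g : String) :
    (l.foldl (fun d p => d.modify (pvGenderKey p) [] (fun b => b ++ [p])) d).getD g []
      = d.getD g [] ++ l.filter (fun p => pvGenderKey p == g) := by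
  induction l generalizing d with
  | nil => simp
  | cons p t ih =>
    simp only [List.foldl_cons, ih, List.filter_cons]
    by_cases h : pvGenderKey p = g
    · simp [h, PySem.Dict.getD_modify_self]
    · have : (pvGenderKey p == g) = false := by simp [h]
      rw [PySem.Dict.getD_modify_of_ne _ _ _ (fun hgp => h hgp.symm)]
      simp [this]

theorem filterA_eq_alt (results : List (List (String × String))) (name gender : Option String) :
    filter_people results name gender = filter_people_alt results name gender := by
  unfold filter_people filter_people_alt pvByGender
  by_cases hn : pvTruthy name = true <;> by_cases hg : pvTruthy gender = true <;>
    simp [hn, hg, getD_foldl_group, List.filter_filter]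
  · congr 1
    funext p
    rw [Bool.and_comm]
    congr 1
    simp [pvGenderKey, pvGetKey, Bool.beq_comm]
  · congr 1
    funext p
    simp [pvGenderKey, pvGetKey, Bool.beq_comm]

-- ===== VERDICT (by name: the statement is the Claim_ definition above) =====
theorem filter_people_spec : Claim_equal_filter_people := by
  intro results name gender _ _
  unfold Spec_filter_people
  exact filterA_eq_alt results name gender
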